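-- pv_equiv track=rewrite | github.com/adithyaphilip/learning | coding/codejam/apac/2.py | solve
-- ===== SOURCE A (Python) =====
-- def get_duplicates(a, pos):
--     ctr = 1
--     lpos = pos - 1
--     while lpos >= 0 and a[lpos] == a[pos]:
--         ctr += 1
--         lpos -= 1
--     rpos = pos + 1
--     while rpos < len(a) and a[rpos] == a[pos]:
--         ctr += 1
--         rpos += 1
--     return ctr
--
-- def binary_search(a, x):
--     beg = 0
--     end = len(a) - 1
--     while beg <= end:
--         mid = (beg + end) // 2
--         if x > a[mid]:
--             beg = mid + 1
--         elif x < a[mid]: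
--             end = mid - 1
--         else:
--             return get_duplicates(a, mid)
--     return 0
--
-- def solve(a, b, c, d, k, dp):
--     s = 0
--     d.sort()
--     for i in set(d):
--         dp[i] = binary_search(d, i)
--
--     for n1 in a:
--         for n2 in b:
--             for n3 in c:
--                 n = k ^ n1 ^ n2 ^ n3
--                 if n in dp:
--                     s += dp[n]
--     return s
-- ===== SOURCE B (Python) =====
-- def solve(a, b, c, d, k, dp):
--     # dp is the count table this function maintains: fill it with the
--     # multiplicities of d, then meet in the middle -- hash the XOR of every
--     # (a, b) pair once and combine each c element with dp's entries.
--     counts = {}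
--     for x in d:
--         counts[x] = counts.get(x, 0) + 1
--     dp.update(counts)
--     ab = {}
--     for n1 in a:
--         for n2 in b:
--             v = n1 ^ n2
--             ab[v] = ab.get(v, 0) + 1
--     total = 0
--     for n3 in c:
--         for key, cnt in dp.items():
--             total += ab.get(k ^ n3 ^ key, 0) * cnt
--     return total
-- ===== Notes on version B (the rewrite author's own statement) =====
-- stated objective: faster
-- what changed: Replaces the triple loop over a*b*c with per-point binary search into sorted d by a meet-in-the-middle scheme: dp is filled with the multiplicities of d by one counting pass (instead of sort + per-key binary search) and a hash counter of all XOR values of (a,b) pairs is built once and combined with dp's entries, removing one whole list dimension from the main loop.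
import Mathlib
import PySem

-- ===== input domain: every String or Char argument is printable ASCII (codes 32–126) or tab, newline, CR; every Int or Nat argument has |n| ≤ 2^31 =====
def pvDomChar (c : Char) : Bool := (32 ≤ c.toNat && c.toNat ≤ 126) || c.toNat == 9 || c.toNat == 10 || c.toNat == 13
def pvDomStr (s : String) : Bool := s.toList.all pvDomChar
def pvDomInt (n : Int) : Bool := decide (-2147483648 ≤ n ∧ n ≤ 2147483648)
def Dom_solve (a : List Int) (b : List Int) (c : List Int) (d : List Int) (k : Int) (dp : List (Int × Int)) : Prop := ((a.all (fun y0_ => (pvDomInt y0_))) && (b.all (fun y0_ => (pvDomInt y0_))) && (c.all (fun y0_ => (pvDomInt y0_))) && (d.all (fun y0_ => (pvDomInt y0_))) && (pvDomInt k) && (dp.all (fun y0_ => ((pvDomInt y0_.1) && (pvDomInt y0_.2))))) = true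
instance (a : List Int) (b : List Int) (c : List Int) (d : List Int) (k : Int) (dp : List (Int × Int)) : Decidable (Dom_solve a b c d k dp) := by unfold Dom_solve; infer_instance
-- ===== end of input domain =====

-- B replaces A's triple loop + binary search by meet-in-the-middle over XOR-pair counts
-- (faster). Both Pythons fill dp with the multiplicities of d and read it back;
-- equivalence is about the RETURN value: A additionally sorts d in place, B leaves d as is.

-- ===== PORT A =====

-- while lpos >= 0 and a[lpos] == a[pos]: ctr += 1; lpos -= 1
-- (fuel = (lpos+1).toNat, the loop's exact iteration bound, makes the recursion structural)
def getDupLeft (a : List Int) (v : Int) : Nat → Int → Int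
  | 0, _ => 0
  | n + 1, lpos =>
    if 0 ≤ lpos ∧ PySem.List.pyGet? a lpos = some v then 1 + getDupLeft a v n (lpos - 1)
    else 0

-- while rpos < len(a) and a[rpos] == a[pos]: ctr += 1; rpos += 1   (fuel = (len - rpos).toNat)
def getDupRight (a : List Int) (v : Int) : Nat → Int → Int
  | 0, _ => 0
  | n + 1, rpos =>
    if rpos < (a.length : Int) ∧ PySem.List.pyGet? a rpos = some v then 1 + getDupRight a v n (rpos + 1)
    else 0

def getDuplicates (a : List Int) (pos : Int) : Int :=
  match PySem.List.pyGet? a pos with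
  | some v => 1 + getDupLeft a v pos.toNat (pos - 1)
      + getDupRight a v ((a.length : Int) - (pos + 1)).toNat (pos + 1)
  | none => 0  -- a[pos] raises in Python; unreachable at A's call sites

-- while beg <= end: …   (fuel = a.length bounds the halving search; at fuel 0 the window is empty)
def bsearchGo (a : List Int) (x : Int) : Nat → Int → Int → Int
  | 0, _, _ => 0
  | n + 1, beg, fin =>
    if beg ≤ fin then
      let mid := PySem.Int.floordiv (beg + fin) 2
      match PySem.List.pyGet? a mid with
      | some y =>
        if x > y then bsearchGo a x n (mid + 1) fin
        else if x < y then bsearchGo a x n beg (mid - 1)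
        else getDuplicates a mid
      | none => 0  -- a[mid] raises in Python; unreachable at A's call sites
    else 0

def binarySearch (a : List Int) (x : Int) : Int :=
  bsearchGo a x a.length 0 ((a.length : Int) - 1)

def solve (a : List Int) (b : List Int) (c : List Int) (d : List Int) (k : Int) (dp : List (Int × Int)) : Int :=
  let ds := PySem.List.sorted d (fun x => x) false
  let dict1 := (PySem.Set.ofList ds).foldl
    (fun m i => m.insert i (binarySearch ds i)) (PySem.Dict.ofList dp)
  a.foldl (fun s n1 =>
    b.foldl (fun s n2 =>
      c.foldl (fun s n3 =>
        let n := PySem.Int.bxor (PySem.Int.bxor (PySem.Int.bxor k n1) n2) n3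
        if dict1.contains n then s + dict1.getD n 0 else s) s) s) 0

-- ===== PORT B =====
def solve_alt (a : List Int) (b : List Int) (c : List Int) (d : List Int) (k : Int) (dp : List (Int × Int)) : Int :=
  let counts : PySem.Dict Int Int := d.foldl (fun m x => m.insert x (m.getD x 0 + 1)) PySem.Dict.empty
  let dpd := (PySem.Dict.ofList dp).update counts.items   -- dp.update(counts)
  let ab : PySem.Dict Int Int := a.foldl (fun m n1 =>
    b.foldl (fun m n2 =>
      let v := PySem.Int.bxor n1 n2
      m.insert v (m.getD v 0 + 1)) m) PySem.Dict.empty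
  c.foldl (fun s n3 =>
    dpd.items.foldl (fun s p =>
      s + ab.getD (PySem.Int.bxor (PySem.Int.bxor k n3) p.1) 0 * p.2) s) 0

-- ===== PRECONDITION & SPEC =====
def Spec_solve (a : List Int) (b : List Int) (c : List Int) (d : List Int) (k : Int) (dp : List (Int × Int)) (out : Int) : Prop := out = solve_alt a b c d k dp
instance (a : List Int) (b : List Int) (c : List Int) (d : List Int) (k : Int) (dp : List (Int × Int)) (out : Int) : Decidable (Spec_solve a b c d k dp out) := by unfold Spec_solve; infer_instance

-- ===== CLAIM (what is proved, stated in full; the proofs are below) =====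
def Claim_equal_solve : Prop := ∀ (a : List Int) (b : List Int) (c : List Int) (d : List Int) (k : Int) (dp : List (Int × Int)), Dom_solve a b c d k dp → Spec_solve a b c d k dp (solve a b c d k dp)

-- ===== LEMMAS AND PROOFS =====

-- ---- XOR algebra for PySem.Int.bxor ----
theorem pv_bxor_ofNat_ofNat (m n : Nat) : PySem.Int.bxor (m : Int) (n : Int) = ((m ^^^ n : Nat) : Int) := by
  simp [PySem.Int.bxor]
theorem pv_bxor_ofNat_negSucc (m n : Nat) : PySem.Int.bxor (m : Int) (Int.negSucc n) = Int.negSucc (m ^^^ n) := by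
  simp [PySem.Int.bxor, Int.negSucc_eq]
  split_ifs with h
  · exact absurd h (by omega)
  · generalize m ^^^ n = q; omega
theorem pv_bxor_negSucc_ofNat (m n : Nat) : PySem.Int.bxor (Int.negSucc m) (n : Int) = Int.negSucc (m ^^^ n) := by
  simp [PySem.Int.bxor, Int.negSucc_eq]
  split_ifs with h
  · exact absurd h (by omega)
  · generalize m ^^^ n = q; omega
theorem pv_bxor_negSucc_negSucc (m n : Nat) : PySem.Int.bxor (Int.negSucc m) (Int.negSucc n) = ((m ^^^ n : Nat) : Int) := by
  simp [PySem.Int.bxor, Int.negSucc_eq]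
  split_ifs <;> first | rfl | (rename_i h; exact absurd h (by omega)) | (congr 1 <;> omega)
theorem pv_bxor_assoc (a b c : Int) :
    PySem.Int.bxor (PySem.Int.bxor a b) c = PySem.Int.bxor a (PySem.Int.bxor b c) := by
  cases a <;> cases b <;> cases c <;>
    simp only [Int.ofNat_eq_natCast, pv_bxor_ofNat_ofNat, pv_bxor_ofNat_negSucc,
      pv_bxor_negSucc_ofNat, pv_bxor_negSucc_negSucc, Nat.xor_assoc]
theorem pv_bxor_cancel (a b : Int) : PySem.Int.bxor a (PySem.Int.bxor a b) = b := by
  rw [← pv_bxor_assoc, PySem.Int.bxor_self, PySem.Int.bxor_comm, PySem.Int.bxor_zero]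
theorem pv_bxor_left_comm (a b c : Int) :
    PySem.Int.bxor a (PySem.Int.bxor b c) = PySem.Int.bxor b (PySem.Int.bxor a c) := by
  rw [← pv_bxor_assoc, ← pv_bxor_assoc, PySem.Int.bxor_comm a b]

-- the XOR-equation that links the two algorithms: the quadruple (n1,n2,n3,key) is
-- counted by A iff it is counted by B
theorem pv_ite_xor (k n1 n2 n3 key w : Int) :
    (if key = PySem.Int.bxor (PySem.Int.bxor (PySem.Int.bxor k n1) n2) n3 then w else 0)
      = (if n2 = PySem.Int.bxor n1 (PySem.Int.bxor (PySem.Int.bxor k n3) key) then w else 0) := by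
  have hiff : key = PySem.Int.bxor (PySem.Int.bxor (PySem.Int.bxor k n1) n2) n3
      ↔ n2 = PySem.Int.bxor n1 (PySem.Int.bxor (PySem.Int.bxor k n3) key) := by
    constructor
    · rintro rfl
      simp [pv_bxor_assoc, pv_bxor_left_comm, pv_bxor_cancel, PySem.Int.bxor_comm]
    · rintro rfl
      simp [pv_bxor_assoc, pv_bxor_left_comm, pv_bxor_cancel, PySem.Int.bxor_comm]
  exact if_congr hiff rfl rfl

-- ---- dictionary lookups ----
theorem pv_getD_foldl_insert_fun (l : List Int) (f : Int → Int) (m : PySem.Dict Int Int) (x : Int) :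
    (l.foldl (fun m i => m.insert i (f i)) m).getD x 0 = if x ∈ l then f x else m.getD x 0 := by
  induction l generalizing m with
  | nil => simp
  | cons i t ih =>
    simp only [List.foldl_cons, ih, List.mem_cons, PySem.Dict.getD_insert]
    by_cases hxt : x ∈ t <;> by_cases hxi : x = i <;> simp [hxt, hxi]

theorem pv_getD_update_map (keys : List Int) (f : Int → Int) (m : PySem.Dict Int Int) (x : Int) :
    (m.update (keys.map (fun k => (k, f k)))).getD x 0 = if x ∈ keys then f x else m.getD x 0 := by
  rw [PySem.Dict.update, List.foldl_map]
  exact pv_getD_foldl_insert_fun keys f m x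

theorem pv_getD_eq_sum (m : PySem.Dict Int Int) (h : m.keys.Nodup) (x : Int) :
    m.getD x 0 = (m.items.map (fun p => if p.1 = x then p.2 else 0)).sum := by
  obtain ⟨l⟩ := m
  induction l with
  | nil => simp [PySem.Dict.getD_eq_get?_getD, PySem.Dict.get?]
  | cons p t ih =>
    obtain ⟨kk, vv⟩ := p
    simp only [PySem.Dict.keys] at h ih ⊢
    simp only [List.map_cons, List.nodup_cons] at h ⊢
    rw [PySem.Dict.getD_eq_get?_getD, PySem.Dict.get?_mk_cons]
    by_cases hk : kk = x
    · subst hk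
      simp only [beq_self_eq_true, if_pos, Option.getD_some, List.sum_cons]
      have : (t.map (fun p => if p.1 = kk then p.2 else 0)).sum = 0 := by
        apply List.sum_eq_zero
        intro z hz
        simp only [List.mem_map] at hz
        obtain ⟨q, hq, rfl⟩ := hz
        have : q.1 ≠ kk := fun he => h.1 (he ▸ List.mem_map_of_mem hq)
        simp [this]
      omega
    · have hbeq : (kk == x) = false := by simp [hk]
      simp only [hbeq, Bool.false_eq_true, if_false, List.sum_cons, if_neg hk]
      rw [← PySem.Dict.getD_eq_get?_getD]
      rw [ih h.2]
      omega

-- ---- sum shapes ----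
theorem pv_sum_swap {α β : Type} (l : List α) (m : List β) (f : α → β → Int) :
    (l.map (fun x => (m.map (f x)).sum)).sum = (m.map (fun y => (l.map (fun x => f x y)).sum)).sum := by
  induction l with
  | nil => simp
  | cons x t ih => simp [ih]

theorem pv_sum_swap3 {α β γ : Type} (B : List α) (C : List β) (P : List γ) (F : α → β → γ → Int) :
    (B.map (fun y => (C.map (fun z => (P.map (F y z)).sum)).sum)).sum
      = (C.map (fun z => (P.map (fun p => (B.map (fun y => F y z p)).sum)).sum)).sum := by
  rw [pv_sum_swap B C]
  simp only [pv_sum_swap B P]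

theorem pv_sum_ite_count (b : List Int) (t w : Int) :
    (b.map (fun y => if y = t then w else 0)).sum = (b.count t : Int) * w := by
  induction b with
  | nil => simp
  | cons y ys ih =>
    by_cases h : y = t <;> simp [h, ih] <;> ring

-- 'if n in dp: s += dp[n]' adds dp.get(n, 0) unconditionally
theorem pv_if_contains_add (m : PySem.Dict Int Int) (s n : Int) :
    (if m.contains n then s + m.getD n 0 else s) = s + m.getD n 0 := by
  by_cases h : m.contains n
  · rw [if_pos h]
  · rw [if_neg h, PySem.Dict.getD_of_not_contains m 0 (by simpa using h)]
    omega

-- ---- the common lookup table: dp overwritten with the multiplicities of d ----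
def pvM (d : List Int) (dp : List (Int × Int)) : PySem.Dict Int Int :=
  (PySem.Dict.ofList dp).update (PySem.Dict.counter d).items

theorem pv_nodup_keys_pvM (d : List Int) (dp : List (Int × Int)) : (pvM d dp).keys.Nodup :=
  PySem.Dict.nodup_keys_update _ _ (PySem.Dict.nodup_keys_ofList dp)

theorem pv_getD_pvM (d : List Int) (dp : List (Int × Int)) (x : Int) :
    (pvM d dp).getD x 0 = if x ∈ d then ((d.count x : Nat) : Int) else (PySem.Dict.ofList dp).getD x 0 := by
  rw [pvM, PySem.Dict.items_counter, pv_getD_update_map]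
  simp [PySem.Set.mem_ofList]

-- ===== the binary-search side: on sorted input it returns the multiplicity =====
theorem pv_pyGet?_toNat (a : List Int) (p : Int) (h0 : 0 ≤ p) (hlt : p.toNat < a.length) :
    PySem.List.pyGet? a p = some a[p.toNat] := by
  have h := PySem.List.pyGet?_ofNat a p.toNat hlt
  rwa [show ((p.toNat : Nat) : Int) = p by omega] at h

theorem pv_gdLeft_count (a : List Int) (v : Int) (hs : a.Pairwise (· ≤ ·))
    (q : Nat) (hq : q < a.length) (hqv : a[q] = v) :
    ∀ n : Nat, ∀ p : Int, (p + 1).toNat ≤ n → p < (q : Int) →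
      getDupLeft a v n p = ((a.take (p + 1).toNat).count v : Int) := by
  intro n
  induction n with
  | zero =>
    intro p hn _
    have : (p + 1).toNat = 0 := by omega
    simp [getDupLeft, this]
  | succ n ih =>
    intro p hn hpq
    have hstep : getDupLeft a v (n + 1) p
        = if 0 ≤ p ∧ PySem.List.pyGet? a p = some v then 1 + getDupLeft a v n (p - 1) else 0 := rfl
    by_cases h0 : 0 ≤ p
    · have hplen : p.toNat < a.length := by omega
      have hget : PySem.List.pyGet? a p = some a[p.toNat] := pv_pyGet?_toNat a p h0 hplen
      have htake : (p + 1).toNat = p.toNat + 1 := by omega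
      by_cases hv : a[p.toNat] = v
      · rw [hstep, if_pos ⟨h0, by rw [hget, hv]⟩]
        rw [ih (p - 1) (by omega) (by omega)]
        have : (p - 1 + 1).toNat = p.toNat := by omega
        rw [this, htake, List.take_succ]
        have : a[p.toNat]? = some v := by
          rw [List.getElem?_eq_getElem hplen, hv]
        rw [this]
        simp [List.count_append]
        omega
      · rw [hstep, if_neg (by rw [hget]; rintro ⟨-, h⟩; exact hv (Option.some_injective _ h))]
        have hvlt : a[p.toNat] < v := by
          have hle : a[p.toNat] ≤ a[q] := by
            rcases Nat.lt_or_ge p.toNat q with hlt' | hge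
            · exact List.pairwise_iff_getElem.mp hs p.toNat q hplen hq hlt'
            · omega
          rw [hqv] at hle
          exact lt_of_le_of_ne hle hv
        have hzero : (a.take (p.toNat + 1)).count v = 0 := by
          rw [List.count_eq_zero]
          intro hmem
          rw [List.mem_iff_getElem] at hmem
          obtain ⟨i, hi, hiv⟩ := hmem
          have hi' : i < a.length := by
            have := List.length_take_le (p.toNat + 1) a
            omega
          have hie : (a.take (p.toNat + 1))[i] = a[i] := List.getElem_take
          have hip : i ≤ p.toNat := by
            simp [List.length_take] at hi
            omega
          have : a[i] ≤ a[p.toNat] := by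
            rcases Nat.lt_or_ge i p.toNat with hlt' | hge
            · exact List.pairwise_iff_getElem.mp hs i p.toNat hi' hplen hlt'
            · have : i = p.toNat := by omega
              subst this; exact le_refl _
          rw [hie] at hiv
          omega
        rw [htake, hzero]
        simp
    · rw [hstep, if_neg (by tauto)]
      have : (p + 1).toNat = 0 := by omega
      simp [this]

theorem pv_gdRight_count (a : List Int) (v : Int) (hs : a.Pairwise (· ≤ ·))
    (q : Nat) (hq : q < a.length) (hqv : a[q] = v) :
    ∀ n : Nat, ∀ p : Int, ((a.length : Int) - p).toNat ≤ n → (q : Int) < p →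
      getDupRight a v n p = ((a.drop p.toNat).count v : Int) := by
  intro n
  induction n with
  | zero =>
    intro p hn _
    have : a.drop p.toNat = [] := List.drop_eq_nil_of_le (by omega)
    simp [getDupRight, this]
  | succ n ih =>
    intro p hn hqp
    have hstep : getDupRight a v (n + 1) p
        = if p < (a.length : Int) ∧ PySem.List.pyGet? a p = some v then 1 + getDupRight a v n (p + 1) else 0 := rfl
    have h0 : 0 ≤ p := by omega
    by_cases hlen : p < (a.length : Int)
    · have hplen : p.toNat < a.length := by omega
      have hget : PySem.List.pyGet? a p = some a[p.toNat] := pv_pyGet?_toNat a p h0 hplen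
      have hdrop : a.drop p.toNat = a[p.toNat] :: a.drop (p.toNat + 1) :=
        List.drop_eq_getElem_cons hplen
      by_cases hv : a[p.toNat] = v
      · rw [hstep, if_pos ⟨hlen, by rw [hget, hv]⟩]
        rw [ih (p + 1) (by omega) (by omega)]
        have : (p + 1).toNat = p.toNat + 1 := by omega
        rw [this, hdrop, List.count_cons]
        simp [hv]
        omega
      · rw [hstep, if_neg (by rw [hget]; rintro ⟨-, h⟩; exact hv (Option.some_injective _ h))]
        have hvlt : v < a[p.toNat] := by
          have hle : a[q] ≤ a[p.toNat] := by
            have : q < p.toNat := by omega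
            exact List.pairwise_iff_getElem.mp hs q p.toNat hq hplen this
          rw [hqv] at hle
          exact lt_of_le_of_ne hle (fun he => hv he.symm)
        have hzero : (a.drop p.toNat).count v = 0 := by
          rw [List.count_eq_zero]
          intro hmem
          rw [List.mem_iff_getElem] at hmem
          obtain ⟨i, hi, hiv⟩ := hmem
          have hi' : p.toNat + i < a.length := by
            simp [List.length_drop] at hi
            omega
          have hie : (a.drop p.toNat)[i] = a[p.toNat + i] := by
            rw [List.getElem_drop]
          have : a[p.toNat] ≤ a[p.toNat + i] := by
            rcases Nat.eq_zero_or_pos i with rfl | hpos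
            · simp
            · exact List.pairwise_iff_getElem.mp hs p.toNat (p.toNat + i) hplen hi' (by omega)
          rw [hie] at hiv
          omega
        rw [hzero]
        simp
    · rw [hstep, if_neg (by omega)]
      have : a.drop p.toNat = [] := List.drop_eq_nil_of_le (by omega)
      simp [this]

theorem pv_getDuplicates_count (a : List Int) (v : Int) (hs : a.Pairwise (· ≤ ·))
    (pos : Int) (h0 : 0 ≤ pos) (hlen : pos.toNat < a.length) (hv : a[pos.toNat] = v) :
    getDuplicates a pos = (a.count v : Int) := by
  have hget : PySem.List.pyGet? a pos = some a[pos.toNat] := pv_pyGet?_toNat a pos h0 hlen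
  rw [getDuplicates, hget, hv]
  show 1 + getDupLeft a v pos.toNat (pos - 1)
      + getDupRight a v ((a.length : Int) - (pos + 1)).toNat (pos + 1) = _
  rw [pv_gdLeft_count a v hs pos.toNat hlen hv pos.toNat (pos - 1) (by omega) (by omega)]
  rw [pv_gdRight_count a v hs pos.toNat hlen hv ((a.length : Int) - (pos + 1)).toNat (pos + 1) (le_refl _) (by omega)]
  have h1 : (pos - 1 + 1).toNat = pos.toNat := by omega
  have h2 : (pos + 1).toNat = pos.toNat + 1 := by omega
  rw [h1, h2]
  have hsplit : a = a.take pos.toNat ++ a.drop pos.toNat := (List.take_append_drop _ _).symm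
  have hdrop : a.drop pos.toNat = a[pos.toNat] :: a.drop (pos.toNat + 1) :=
    List.drop_eq_getElem_cons hlen
  conv_rhs => rw [hsplit, hdrop]
  rw [List.count_append, List.count_cons]
  simp [hv]
  omega

theorem pv_bsearchGo_count (a : List Int) (x : Int) (hs : a.Pairwise (· ≤ ·)) (hx : x ∈ a) :
    ∀ n : Nat, ∀ beg fin : Int, (fin - beg + 1).toNat ≤ n → 0 ≤ beg → fin < (a.length : Int) →
      (∀ j : Nat, (hj : j < a.length) → ((j : Int) < beg ∨ fin < (j : Int)) → a[j] ≠ x) →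
      bsearchGo a x n beg fin = (a.count x : Int) := by
  intro n
  induction n with
  | zero =>
    intro beg fin hn h0 hlen hinv
    obtain ⟨j, hj, hjx⟩ := List.mem_iff_getElem.mp hx
    exact absurd hjx (hinv j hj (by omega))
  | succ n ih =>
    intro beg fin hn h0 hlen hinv
    by_cases hb : beg ≤ fin
    · have hmid := PySem.Int.floordiv_two_mid_bounds hb
      set mid := PySem.Int.floordiv (beg + fin) 2 with hmiddef
      have hm0 : 0 ≤ mid := by omega
      have hmlen : mid.toNat < a.length := by omega
      have hget : PySem.List.pyGet? a mid = some a[mid.toNat] := pv_pyGet?_toNat a mid hm0 hmlen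
      have hstep : bsearchGo a x (n + 1) beg fin
          = match PySem.List.pyGet? a mid with
            | some y =>
              if x > y then bsearchGo a x n (mid + 1) fin
              else if x < y then bsearchGo a x n beg (mid - 1)
              else getDuplicates a mid
            | none => 0 := by
        rw [show bsearchGo a x (n + 1) beg fin
            = if beg ≤ fin then
                (match PySem.List.pyGet? a (PySem.Int.floordiv (beg + fin) 2) with
                 | some y =>
                   if x > y then bsearchGo a x n (PySem.Int.floordiv (beg + fin) 2 + 1) fin
                   else if x < y then bsearchGo a x n beg (PySem.Int.floordiv (beg + fin) 2 - 1)
                   else getDuplicates a (PySem.Int.floordiv (beg + fin) 2)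
                 | none => 0)
              else 0 from rfl, if_pos hb, ← hmiddef]
      rw [hstep]
      simp only [hget]
      by_cases hgt : x > a[mid.toNat]
      · rw [if_pos hgt]
        apply ih (mid + 1) fin (by omega) (by omega) hlen
        intro j hj hout
        rcases hout with hlt | hgt'
        · have hjle : a[j] ≤ a[mid.toNat] := by
            rcases Nat.lt_or_ge j mid.toNat with h | h
            · exact List.pairwise_iff_getElem.mp hs j mid.toNat hj hmlen h
            · have : j = mid.toNat := by omega
              subst this; exact le_refl _
          omega
        · exact hinv j hj (Or.inr hgt')
      · rw [if_neg hgt]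
        by_cases hlt : x < a[mid.toNat]
        · rw [if_pos hlt]
          apply ih beg (mid - 1) (by omega) h0 (by omega)
          intro j hj hout
          rcases hout with hlt' | hgt'
          · exact hinv j hj (Or.inl hlt')
          · by_cases hjfin : fin < (j : Int)
            · exact hinv j hj (Or.inr hjfin)
            · have hge : a[mid.toNat] ≤ a[j] := by
                rcases Nat.lt_or_ge mid.toNat j with h | h
                · exact List.pairwise_iff_getElem.mp hs mid.toNat j hmlen hj h
                · have : j = mid.toNat := by omega
                  subst this; exact le_refl _
              omega
        · rw [if_neg hlt]
          have hveq : a[mid.toNat] = x := by omega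
          exact pv_getDuplicates_count a x hs mid hm0 hmlen hveq
    · obtain ⟨j, hj, hjx⟩ := List.mem_iff_getElem.mp hx
      exact absurd hjx (hinv j hj (by omega))

theorem pv_binarySearch_count (a : List Int) (x : Int) (hs : a.Pairwise (· ≤ ·)) (hx : x ∈ a) :
    binarySearch a x = (a.count x : Int) := by
  rw [binarySearch]
  apply pv_bsearchGo_count a x hs hx a.length 0 ((a.length : Int) - 1)
    (by omega) (le_refl _) (by omega)
  intro j hj hout
  rcases hout with h | h <;> omega

-- A's lookup table equals the common one
theorem pv_lookupA_eq (d : List Int) (dp : List (Int × Int)) (x : Int) :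
    ((PySem.Set.ofList (PySem.List.sorted d (fun x => x) false)).foldl
        (fun m i => m.insert i (binarySearch (PySem.List.sorted d (fun x => x) false) i))
        (PySem.Dict.ofList dp)).getD x 0 = (pvM d dp).getD x 0 := by
  rw [pv_getD_foldl_insert_fun, pv_getD_pvM]
  have hperm := PySem.List.sorted_perm d (fun x => x) false
  have hmem : x ∈ PySem.Set.ofList (PySem.List.sorted d (fun x => x) false) ↔ x ∈ d := by
    rw [PySem.Set.mem_ofList, PySem.List.mem_sorted]
  by_cases hx : x ∈ d
  · rw [if_pos (hmem.mpr hx), if_pos hx]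
    rw [pv_binarySearch_count _ x (PySem.List.sorted_pairwise d (fun x => x))
      ((PySem.List.mem_sorted d (fun x => x) false x).mpr hx)]
    rw [hperm.count_eq]
  · rw [if_neg (fun h => hx (hmem.mp h)), if_neg hx]

-- B's pair counter: lookups are pair counts
theorem pv_ab_aux (a' b : List Int) (v : Int) (m : PySem.Dict Int Int) :
    ((a'.foldl (fun m n1 => (b.map (fun n2 => PySem.Int.bxor n1 n2)).foldl
        (fun m x => m.insert x (m.getD x 0 + 1)) m) m).getD v 0)
      = m.getD v 0 + (a'.map (fun n1 => (((b.map (fun n2 => PySem.Int.bxor n1 n2)).count v : Nat) : Int))).sum := by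
  induction a' generalizing m with
  | nil => simp
  | cons n1 t ih =>
    rw [List.foldl_cons, ih, PySem.Dict.getD_foldl_insert_add_one]
    simp only [List.map_cons, List.sum_cons]
    omega

theorem pv_bxor_injective (n1 : Int) : Function.Injective (fun n2 => PySem.Int.bxor n1 n2) := by
  intro x y h
  have := congrArg (PySem.Int.bxor n1) h
  simpa [pv_bxor_cancel] using this

theorem pv_ab_getD (a b : List Int) (v : Int) :
    ((a.foldl (fun m n1 => b.foldl (fun m n2 =>
        m.insert (PySem.Int.bxor n1 n2) (m.getD (PySem.Int.bxor n1 n2) 0 + 1)) m)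
        (PySem.Dict.empty : PySem.Dict Int Int)).getD v 0)
      = (a.map (fun n1 => ((b.count (PySem.Int.bxor n1 v) : Nat) : Int))).sum := by
  have hshape : ∀ (n1 : Int) (m : PySem.Dict Int Int),
      b.foldl (fun m n2 => m.insert (PySem.Int.bxor n1 n2) (m.getD (PySem.Int.bxor n1 n2) 0 + 1)) m
        = (b.map (fun n2 => PySem.Int.bxor n1 n2)).foldl (fun m x => m.insert x (m.getD x 0 + 1)) m := by
    intro n1 m
    rw [List.foldl_map]
  simp only [hshape]
  rw [pv_ab_aux]
  simp only [PySem.Dict.getD_empty, zero_add]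
  refine congrArg List.sum (List.map_congr_left (fun n1 _ => ?_))
  congr 1
  have hv : v = PySem.Int.bxor n1 (PySem.Int.bxor n1 v) := (pv_bxor_cancel n1 v).symm
  conv_lhs => rw [hv]
  exact List.count_map_of_injective b _ (pv_bxor_injective n1) _

-- the meet-in-the-middle rearrangement, over an arbitrary association list
theorem pv_bridge (items : List (Int × Int)) (a b c : List Int) (k : Int) :
    (a.map (fun n1 => (b.map (fun n2 => (c.map (fun n3 =>
        (items.map (fun p => if p.1 = PySem.Int.bxor (PySem.Int.bxor (PySem.Int.bxor k n1) n2) n3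
          then p.2 else 0)).sum)).sum)).sum)).sum
      = (c.map (fun n3 => (items.map (fun p => (a.map (fun n1 =>
          ((b.count (PySem.Int.bxor n1 (PySem.Int.bxor (PySem.Int.bxor k n3) p.1)) : Nat) : Int))).sum * p.2)).sum)).sum := by
  simp only [← List.sum_map_mul_right, ← pv_sum_ite_count]
  simp only [pv_ite_xor]
  simp only [pv_sum_swap3 b c items]
  rw [pv_sum_swap3 a c items]

theorem main_eq (a b c d : List Int) (k : Int) (dp : List (Int × Int)) :
    solve a b c d k dp = solve_alt a b c d k dp := by
  simp only [solve, solve_alt]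
  simp only [pv_if_contains_add, PySem.List.foldl_add, zero_add]
  simp only [pv_lookupA_eq]
  simp only [pv_getD_eq_sum (pvM d dp) (pv_nodup_keys_pvM d dp)]
  simp only [pv_ab_getD]
  rw [PySem.Dict.foldl_insert_getD_add_one_eq_counter]
  rw [show (PySem.Dict.ofList dp).update (PySem.Dict.counter d).items = pvM d dp from rfl]
  exact pv_bridge (pvM d dp).items a b c k

-- ===== VERDICT (by name: the statement is the Claim_ definition above) =====
theorem solve_spec : Claim_equal_solve := by
  intro a b c d k dp _
  unfold Spec_solve
  exact main_eq a b c d k dp
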